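-- pv_equiv track=rewrite | github.com/island255/Binary-Decomposition-Under-FCG-Variance | 4.construct_function_mapping/three_types_of_mappings/construct_cross_compiler_and_opt.py | extract_b2s_mapping
-- ===== SOURCE A (Python) =====
-- def extract_b2s_mapping(mapping):
--     """提取二进制到源码的映射关系"""
--     bf2sf = {}
--     sf2bf = {}
--     for bf in mapping:
--         sf_list = mapping[bf]
--         if sf_list:
--             bf2sf[bf] = []
--             for sf_info in sf_list:
--                 sf = "&".join([sf_info[0], sf_info[1], str(sf_info[2][0])])
--                 bf2sf[bf].append(sf)
--                 if sf not in sf2bf: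
--                     sf2bf[sf] = []
--                 sf2bf[sf].append(bf)
--     return bf2sf, sf2bf
-- ===== SOURCE B (Python) =====
-- def extract_b2s_mapping(mapping):
--     """Flatten into one (bf, sf) edge list, then group it twice: by bf and by sf."""
--     edges = [(bf, "&".join([si[0], si[1], str(si[2][0])]))
--              for bf, sf_list in mapping.items() for si in sf_list]
--
--     def group(pairs):
--         return {k: [v for k2, v in pairs if k2 == k]
--                 for k in dict.fromkeys(k for k, _ in pairs)}
--
--     return group(edges), group([(s, b) for b, s in edges])
-- ===== Notes on version B (the rewrite author's own statement) =====
-- stated objective: alternative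
-- what changed: A incrementally updates two dicts in one interleaved loop; B first flattens the input into a flat (bf, sf) edge list and then derives each dict by a generic group-by (dict.fromkeys for key order, a filter pass per key) applied to the edge list and to its swapped form.
import Mathlib
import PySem

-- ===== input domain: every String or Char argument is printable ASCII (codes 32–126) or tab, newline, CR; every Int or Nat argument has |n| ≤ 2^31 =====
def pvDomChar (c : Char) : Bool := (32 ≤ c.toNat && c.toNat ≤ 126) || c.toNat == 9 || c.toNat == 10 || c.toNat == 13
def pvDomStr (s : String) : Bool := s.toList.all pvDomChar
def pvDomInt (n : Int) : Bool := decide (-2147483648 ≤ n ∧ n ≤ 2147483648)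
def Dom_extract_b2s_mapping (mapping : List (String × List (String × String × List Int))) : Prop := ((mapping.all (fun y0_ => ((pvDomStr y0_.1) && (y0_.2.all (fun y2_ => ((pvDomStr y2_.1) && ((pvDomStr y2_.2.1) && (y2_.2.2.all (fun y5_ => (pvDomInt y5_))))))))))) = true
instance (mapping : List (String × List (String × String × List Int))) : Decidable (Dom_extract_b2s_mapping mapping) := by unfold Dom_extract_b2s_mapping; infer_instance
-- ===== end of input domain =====

-- B replaces A's interleaved two-dict update loop by flatten-to-edge-list + a generic group-by applied twice (alternative decomposition, same results).


-- ===== PORT A =====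
-- sf = "&".join([sf_info[0], sf_info[1], str(sf_info[2][0])])  (pyGetD is exact under Pre_: sf_info[2] nonempty)
def pvJoin (sf_info : String × String × List Int) : String :=
  PySem.Str.join "&" [sf_info.1, sf_info.2.1, PySem.Int.toStr (PySem.List.pyGetD sf_info.2.2 0 0)]

def extract_b2s_mapping (mapping : List (String × List (String × String × List Int))) : (List (String × List String)) × (List (String × List String)) :=
  let st := mapping.foldl
    (fun (st : PySem.Dict String (List String) × PySem.Dict String (List String)) bfp =>
      if bfp.2.isEmpty then st
      else
        bfp.2.foldl
          (fun st sf_info =>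
            let sf := pvJoin sf_info
            let bf2sf := st.1.modify bfp.1 [] (fun l => l ++ [sf])
            let sf2bf := if st.2.contains sf then st.2 else st.2.insert sf []
            (bf2sf, sf2bf.modify sf [] (fun l => l ++ [bfp.1])))
          (st.1.insert bfp.1 [], st.2))
    (PySem.Dict.empty, PySem.Dict.empty)
  (st.1.items, st.2.items)

-- ===== PORT B =====
-- group(pairs): dict comprehension keyed by dict.fromkeys (ordered dedup), value = one filter pass per key;
-- the resulting dict's items are exactly this list (keys are distinct by construction).
def pvGroup (pairs : List (String × String)) : List (String × List String) :=
  (PySem.List.dedup (pairs.map (fun e => e.1))).map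
    (fun k => (k, (pairs.filter (fun e => e.1 == k)).map (fun e => e.2)))

def extract_b2s_mapping_alt (mapping : List (String × List (String × String × List Int))) : (List (String × List String)) × (List (String × List String)) :=
  let edges := mapping.flatMap (fun p => p.2.map (fun si => (p.1, pvJoin si)))
  (pvGroup edges, pvGroup (edges.map (fun e => (e.2, e.1))))

-- ===== PRECONDITION & SPEC =====
-- Pre_ excludes (a) inputs where A raises IndexError (some processed sf_info[2] is the empty list)
-- and (b) association lists with duplicate keys, which do not represent a Python dict (A's argument
-- is a dict, which cannot carry duplicate keys; on such lists the collapsed-dict value is accidental).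
def Pre_extract_b2s_mapping (mapping : List (String × List (String × String × List Int))) : Prop :=
  (mapping.map (fun p => p.1.toList)).Nodup ∧
  ∀ p ∈ mapping, ∀ si ∈ p.2, si.2.2 ≠ []
instance (mapping : List (String × List (String × String × List Int))) : Decidable (Pre_extract_b2s_mapping mapping) := by unfold Pre_extract_b2s_mapping; infer_instance

def pvWitness_extract_b2s_mapping : (List (String × List (String × String × List Int))) :=
  [("f", [("a.c", "g", [3, 4]), ("a.c", "h", [1])]), ("e", [])]

def Spec_extract_b2s_mapping (mapping : List (String × List (String × String × List Int))) (out : (List (String × List String)) × (List (String × List String))) : Prop := out = extract_b2s_mapping_alt mapping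
instance (mapping : List (String × List (String × String × List Int))) (out : (List (String × List String)) × (List (String × List String))) : Decidable (Spec_extract_b2s_mapping mapping out) := by unfold Spec_extract_b2s_mapping; infer_instance

-- ===== CLAIM (what is proved, stated in full; the proofs are below) =====
def Claim_equal_extract_b2s_mapping : Prop := ∀ (mapping : List (String × List (String × String × List Int))), Dom_extract_b2s_mapping mapping → Pre_extract_b2s_mapping mapping → Spec_extract_b2s_mapping mapping (extract_b2s_mapping mapping)

-- ===== LEMMAS AND PROOFS =====

-- A's sf2bf step ("if sf not in sf2bf: sf2bf[sf] = []" then append) is the plain modify-append.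
lemma stepS_eq {s : PySem.Dict String (List String)} {sf bf : String} :
    (if s.contains sf then s else s.insert sf []).modify sf [] (fun l => l ++ [bf])
      = s.modify sf [] (fun l => l ++ [bf]) := by
  by_cases h : s.contains sf
  · simp [h]
  · simp only [h, Bool.false_eq_true, if_false]
    simp only [PySem.Dict.modify, PySem.Dict.getD_insert_self, PySem.Dict.insert_insert_self,
      PySem.Dict.getD_of_not_contains _ _ (by simpa using h)]

-- A's inner loop over sf_list, started right after "bf2sf[bf] = []".
lemma innerA_eq (bf : String) (sfl : List (String × String × List Int)) :
    ∀ (b s : PySem.Dict String (List String)) (acc : List String),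
    sfl.foldl
      (fun st sf_info =>
        let sf := pvJoin sf_info
        let bf2sf := st.1.modify bf [] (fun l => l ++ [sf])
        let sf2bf := if st.2.contains sf then st.2 else st.2.insert sf []
        (bf2sf, sf2bf.modify sf [] (fun l => l ++ [bf])))
      (b.insert bf acc, s)
    = (b.insert bf (acc ++ sfl.map pvJoin),
       sfl.foldl (fun s si => s.modify (pvJoin si) [] (fun l => l ++ [bf])) s) := by
  induction sfl with
  | nil => intro b s acc; simp
  | cons hd tl ih =>
      intro b s acc
      have hstep :
          (let sf := pvJoin hd
           let bf2sf := (b.insert bf acc, s).1.modify bf [] (fun l => l ++ [sf])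
           let sf2bf := if (b.insert bf acc, s).2.contains sf then (b.insert bf acc, s).2
             else (b.insert bf acc, s).2.insert sf []
           (bf2sf, sf2bf.modify sf [] (fun l => l ++ [bf])))
          = (b.insert bf (acc ++ [pvJoin hd]),
             s.modify (pvJoin hd) [] (fun l => l ++ [bf])) := by
        simp only [stepS_eq]
        simp [PySem.Dict.modify, PySem.Dict.getD_insert_self, PySem.Dict.insert_insert_self]
      rw [List.foldl_cons, hstep, ih]
      simp

-- The whole interleaved pass equals (forward insert-fold, inversion modify-fold over the filtered list).
lemma mainA_eq (L : List (String × List (String × String × List Int))) :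
    ∀ (b s : PySem.Dict String (List String)),
    (∀ p ∈ L, b.contains p.1 = false) → (L.map (fun p => p.1)).Nodup →
    L.foldl
      (fun (st : PySem.Dict String (List String) × PySem.Dict String (List String)) bfp =>
        if bfp.2.isEmpty then st
        else
          bfp.2.foldl
            (fun st sf_info =>
              let sf := pvJoin sf_info
              let bf2sf := st.1.modify bfp.1 [] (fun l => l ++ [sf])
              let sf2bf := if st.2.contains sf then st.2 else st.2.insert sf []
              (bf2sf, sf2bf.modify sf [] (fun l => l ++ [bfp.1])))
            (st.1.insert bfp.1 [], st.2))
      (b, s)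
    = ((L.filter (fun p => !p.2.isEmpty)).foldl (fun d p => d.insert p.1 (p.2.map pvJoin)) b,
       (L.filter (fun p => !p.2.isEmpty)).foldl
         (fun s p => p.2.foldl (fun s si => s.modify (pvJoin si) [] (fun l => l ++ [p.1])) s) s) := by
  induction L with
  | nil => intro b s _ _; simp
  | cons p L ih =>
      intro b s hfresh hnd
      simp only [List.map_cons, List.nodup_cons] at hnd
      by_cases hp : p.2.isEmpty
      · simp only [List.foldl_cons, List.filter_cons, hp, if_pos, Bool.not_true,
          Bool.false_eq_true, if_false]
        exact ih b s (fun q hq => hfresh q (List.mem_cons_of_mem _ hq)) hnd.2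
      · simp only [List.foldl_cons, List.filter_cons, hp, Bool.not_false, if_true,
          Bool.false_eq_true, if_false, innerA_eq p.1 p.2 b s []]
        simp only [List.nil_append]
        refine ih _ _ (fun q hq => ?_) hnd.2
        rw [PySem.Dict.contains_insert]
        have : q.1 ≠ p.1 := by
          intro h; exact hnd.1 (h ▸ (List.mem_map_of_mem hq))
        simp [this, hfresh q (List.mem_cons_of_mem _ hq)]

-- pvGroup IS the items list of the canonical modify-append grouping fold.
lemma pvGroup_eq_fold (es : List (String × String)) :
    pvGroup es
      = (es.foldl (fun d e => d.modify e.1 [] (fun l => l ++ [e.2])) PySem.Dict.empty).items := by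
  have hkeys : (es.foldl (fun d e => d.modify e.1 [] (fun l => l ++ [e.2]))
      PySem.Dict.empty).keys = PySem.Set.ofList (es.map (fun e => e.1)) := by
    rw [PySem.Dict.keys_foldl_modify_key (key := fun e : String × String => e.1)
      (f := fun _ e => fun l => l ++ [e.2])]
    rfl
  have hnd : (es.foldl (fun d e => d.modify e.1 [] (fun l => l ++ [e.2]))
      PySem.Dict.empty).keys.Nodup := by
    rw [hkeys]; exact PySem.Set.nodup_ofList _
  rw [PySem.Dict.items_eq_map_keys _ hnd []]
  rw [hkeys]
  unfold pvGroup
  simp only [PySem.List.dedup_eq_ofList]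
  refine List.map_congr_left (fun k _ => ?_)
  rw [PySem.Dict.getD_foldl_modify_append]
  simp

-- folding over a flatMap is the nested fold.
lemma foldl_flatMap {α β γ : Type} (l : List α) (g : α → List β) (f : γ → β → γ) :
    ∀ init : γ, (l.flatMap g).foldl f init = l.foldl (fun acc p => (g p).foldl f acc) init := by
  induction l with
  | nil => intro init; simp
  | cons p l ih => intro init; simp [List.foldl_append, ih]

-- pointwise-equal step functions fold equally (specific shape used below).
lemma foldl_congr' {α γ : Type} (l : List α) (f g : γ → α → γ) (a : γ)
    (h : ∀ acc x, x ∈ l → f acc x = g acc x) : l.foldl f a = l.foldl g a := by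
  induction l generalizing a with
  | nil => rfl
  | cons x l ih => rw [List.foldl_cons, List.foldl_cons, h a x List.mem_cons_self]
                   exact ih _ (fun acc y hy => h acc y (List.mem_cons_of_mem _ hy))

-- a run of modify-appends at one key collapses to one insert.
lemma modify_chain (k : String) (vs : List String) :
    ∀ d : PySem.Dict String (List String), vs ≠ [] →
    vs.foldl (fun d v => d.modify k [] (fun l => l ++ [v])) d
      = d.insert k (d.getD k [] ++ vs) := by
  induction vs with
  | nil => intro d h; exact absurd rfl h
  | cons v vs ih =>
      intro d _
      by_cases hvs : vs = []
      · subst hvs; simp [PySem.Dict.modify]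
      · rw [List.foldl_cons, ih _ hvs]
        simp [PySem.Dict.modify, PySem.Dict.getD_insert_self, PySem.Dict.insert_insert_self]

-- the edge-list grouping fold over the forward edges equals A's forward insert-fold.
lemma forwardB_eq (L : List (String × List (String × String × List Int))) :
    ∀ d : PySem.Dict String (List String),
    (∀ p ∈ L, d.contains p.1 = false) → (L.map (fun p => p.1)).Nodup →
    L.foldl (fun d p => (p.2.map pvJoin).foldl
        (fun d v => d.modify p.1 [] (fun l => l ++ [v])) d) d
      = (L.filter (fun p => !p.2.isEmpty)).foldl (fun d p => d.insert p.1 (p.2.map pvJoin)) d := by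
  induction L with
  | nil => intro d _ _; simp
  | cons p L ih =>
      intro d hfresh hnd
      simp only [List.map_cons, List.nodup_cons] at hnd
      by_cases hp : p.2.isEmpty
      · have : p.2 = [] := by simpa using hp
        simp only [List.foldl_cons, List.filter_cons, this, List.map_nil, List.foldl_nil]
        exact ih d (fun q hq => hfresh q (List.mem_cons_of_mem _ hq)) hnd.2
      · have hne : p.2.map pvJoin ≠ [] := by
          simp only [ne_eq, List.map_eq_nil_iff]; simpa using hp
        simp only [List.foldl_cons, List.filter_cons, hp, Bool.not_false, if_true,
          modify_chain p.1 (p.2.map pvJoin) d hne,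
          PySem.Dict.getD_of_not_contains _ _ (hfresh p (List.mem_cons_self)), List.nil_append]
        refine ih _ (fun q hq => ?_) hnd.2
        rw [PySem.Dict.contains_insert]
        have : q.1 ≠ p.1 := by
          intro h; exact hnd.1 (h ▸ (List.mem_map_of_mem hq))
        simp [this, hfresh q (List.mem_cons_of_mem _ hq)]

-- ===== VERDICT (by name: the statement is the Claim_ definition above) =====
theorem extract_b2s_mapping_spec : Claim_equal_extract_b2s_mapping := by
  intro mapping _ hpre
  unfold Spec_extract_b2s_mapping extract_b2s_mapping extract_b2s_mapping_alt
  obtain ⟨hnd', _⟩ := hpre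
  have hnd : (mapping.map (fun p => p.1)).Nodup := by
    have := hnd'
    rw [show (mapping.map (fun p => p.1.toList))
          = (mapping.map (fun p => p.1)).map String.toList by simp [List.map_map]] at this
    exact this.of_map
  rw [mainA_eq mapping PySem.Dict.empty PySem.Dict.empty
        (fun p _ => PySem.Dict.contains_empty _) hnd]
  dsimp only
  -- forward component
  have hfwd : pvGroup (mapping.flatMap (fun p => p.2.map (fun si => (p.1, pvJoin si))))
      = ((mapping.filter (fun p => !p.2.isEmpty)).foldl
          (fun d p => d.insert p.1 (p.2.map pvJoin)) PySem.Dict.empty).items := by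
    rw [pvGroup_eq_fold, foldl_flatMap]
    congr 1
    rw [← forwardB_eq mapping PySem.Dict.empty (fun p _ => PySem.Dict.contains_empty _) hnd]
    refine foldl_congr' _ _ _ _ (fun d p _ => ?_)
    rw [List.foldl_map, List.foldl_map]
  -- reverse component
  have hrev : pvGroup ((mapping.flatMap (fun p => p.2.map (fun si => (p.1, pvJoin si)))).map
        (fun e => (e.2, e.1)))
      = ((mapping.filter (fun p => !p.2.isEmpty)).foldl
          (fun s p => p.2.foldl (fun s si => s.modify (pvJoin si) [] (fun l => l ++ [p.1])) s)
          PySem.Dict.empty).items := by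
    rw [pvGroup_eq_fold]
    congr 1
    rw [List.map_flatMap, foldl_flatMap]
    rw [List.foldl_filter]
    refine foldl_congr' _ _ _ _ (fun d p _ => ?_)
    by_cases hp : p.2.isEmpty
    · have : p.2 = [] := by simpa using hp
      simp [this]
    · simp only [hp, Bool.not_false, if_true, List.map_map, List.foldl_map]
      rfl
  rw [hfwd, hrev]
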